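-- pv_equiv track=rewrite | github.com/callmekohei/tigaDebugger | rplugin/python3/tigaDebugger/source/pdb.py | cutOutProperly
-- ===== SOURCE A (Python) =====
-- def cutOutProperly(prompt,lst):
--
--     #  (sdb)
--     #      step into
--     #      foo
--     #  (sdb)         <---+
--     #      step out      |
--     #      bar           |
--     #  (sdb)         <---+
--
--     reversed_lst = lst[::-1]
--     cnt = 0
--
--     for s,n in zip(reversed_lst,range(0,len(reversed_lst)-1)):
--         if prompt in s:
--             cnt = cnt + 1
--             if cnt == 2:
--                 return reversed_lst[:n+1][::-1]
--                 break
--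
--     #  Welcome...    <---+
--     #      ...           |
--     #      ...           |
--     #  (sdb)         <---+
--
--     if cnt == 1:
--         return lst
--     else:
--         return lst
-- ===== SOURCE B (Python) =====
-- def cutOutProperly(prompt, lst):
--     # indices (in lst) of prompt-containing lines, never looking at lst[0]
--     hits = [i for i, s in enumerate(lst[1:], 1) if prompt in s]
--     if len(hits) >= 2:
--         return lst[hits[-2]:]
--     return lst
-- ===== Notes on version B (the rewrite author's own statement) =====
-- stated objective: simpler
-- what changed: Replaces A's reverse-copy plus count-as-you-go scan over zip(reversed,range) with one forward pass that collects the matching indices and takes a single slice at the second-from-last one.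
import Mathlib
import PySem

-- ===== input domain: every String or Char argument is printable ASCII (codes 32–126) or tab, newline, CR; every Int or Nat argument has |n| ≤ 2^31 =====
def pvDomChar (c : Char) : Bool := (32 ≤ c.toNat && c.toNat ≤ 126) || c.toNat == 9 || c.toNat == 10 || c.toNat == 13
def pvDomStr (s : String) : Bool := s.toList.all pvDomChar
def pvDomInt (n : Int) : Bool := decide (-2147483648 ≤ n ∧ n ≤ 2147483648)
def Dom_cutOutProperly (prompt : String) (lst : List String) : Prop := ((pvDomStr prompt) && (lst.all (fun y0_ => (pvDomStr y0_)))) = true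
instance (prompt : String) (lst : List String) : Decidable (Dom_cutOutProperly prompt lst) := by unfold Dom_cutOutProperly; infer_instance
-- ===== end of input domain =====

-- B replaces A's reverse-copy + count-as-you-go scan by one forward pass that
-- collects the matching indices and then takes a single slice (objective: simpler).


-- ===== PORT A =====
-- the for-loop over zip(reversed_lst, range(0, len(reversed_lst)-1)); returns
-- (early return value if any, final cnt)
def cutOutProperlyLoop (prompt : String) (reversed_lst : List String) :
    List (String × Int) → Int → (Option (List String)) × Int
  | [], cnt => (none, cnt)
  | (s, n) :: rest, cnt =>
    if PySem.Str.isIn prompt s then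
      let cnt' := cnt + 1
      if cnt' == 2 then
        -- return reversed_lst[:n+1][::-1]
        (some ((PySem.List.slice? (PySem.List.slice reversed_lst none (some (n + 1))) none none (-1)).getD []), cnt')
      else cutOutProperlyLoop prompt reversed_lst rest cnt'
    else cutOutProperlyLoop prompt reversed_lst rest cnt

def cutOutProperly (prompt : String) (lst : List String) : List String :=
  let reversed_lst := (PySem.List.slice? lst none none (-1)).getD []   -- lst[::-1]
  match cutOutProperlyLoop prompt reversed_lst
      (reversed_lst.zip (PySem.List.pyRange 0 (PySem.List.len reversed_lst - 1) 1)) 0 with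
  | (some res, _) => res
  | (none, cnt) => if cnt == 1 then lst else lst

-- ===== PORT B =====
def cutOutProperly_alt (prompt : String) (lst : List String) : List String :=
  -- hits = [i for i, s in enumerate(lst[1:], 1) if prompt in s]
  let hits := ((PySem.List.enumerate (PySem.List.slice lst (some 1) none) 1).filter
      (fun q => PySem.Str.isIn prompt q.2)).map (fun q => q.1)
  if 2 ≤ hits.length then
    PySem.List.slice lst (some (PySem.List.pyGetD hits (-2) 0)) none   -- lst[hits[-2]:]
  else lst

-- ===== PRECONDITION & SPEC =====
def Spec_cutOutProperly (prompt : String) (lst : List String) (out : List String) : Prop := out = cutOutProperly_alt prompt lst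
instance (prompt : String) (lst : List String) (out : List String) : Decidable (Spec_cutOutProperly prompt lst out) := by unfold Spec_cutOutProperly; infer_instance

-- ===== CLAIM (what is proved, stated in full; the proofs are below) =====
def Claim_equal_cutOutProperly : Prop := ∀ (prompt : String) (lst : List String), Dom_cutOutProperly prompt lst → Spec_cutOutProperly prompt lst (cutOutProperly prompt lst)

-- ===== LEMMAS AND PROOFS =====

-- index of the first hit in a list
def idx1 (p : String → Bool) : List String → Option Nat
  | [] => none
  | s :: t => if p s then some 0 else (idx1 p t).map (· + 1)

-- index of the second hit in a list
def idx2 (p : String → Bool) : List String → Option Nat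
  | [] => none
  | s :: t => if p s then (idx1 p t).map (· + 1) else (idx2 p t).map (· + 1)

-- index of the last hit, computed forwards
def lastHit? (p : String → Bool) : List String → Option Nat
  | [] => none
  | s :: t => match lastHit? p t with
    | some j => some (j + 1)
    | none => if p s then some 0 else none

-- index of the second-from-last hit, computed forwards
def sndLast? (p : String → Bool) : List String → Option Nat
  | [] => none
  | s :: t => match sndLast? p t with
    | some j => some (j + 1)
    | none => if p s && (lastHit? p t).isSome then some 0 else none

theorem idx1_none (p : String → Bool) (xs : List String) (h : idx1 p xs = none) :
    xs.countP p = 0 := by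
  induction xs with
  | nil => rfl
  | cons s t ih =>
    by_cases hs : p s
    · simp [idx1, hs] at h
    · simp only [idx1, hs, Bool.false_eq_true, if_false, Option.map_eq_none_iff] at h
      rw [List.countP_cons]
      simp [hs, ih h]

theorem idx1_append_singleton (p : String → Bool) (u : List String) (s : String) :
    idx1 p (u ++ [s]) = match idx1 p u with
      | some k => some k
      | none => if p s then some u.length else none := by
  induction u with
  | nil => cases hps : p s <;> simp [idx1, hps]
  | cons x t ih =>
    by_cases hx : p x
    · simp [idx1, hx]
    · simp only [List.cons_append, idx1, hx, Bool.false_eq_true, if_false, ih]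
      cases h1 : idx1 p t
      · cases hps : p s <;> simp [hps]
      · simp

theorem idx2_append_singleton (p : String → Bool) (u : List String) (s : String) :
    idx2 p (u ++ [s]) = match idx2 p u with
      | some k => some k
      | none => if p s && (idx1 p u).isSome then some u.length else none := by
  induction u with
  | nil => cases hps : p s <;> simp [idx2, idx1, hps]
  | cons x t ih =>
    by_cases hx : p x
    · simp only [List.cons_append, idx2, hx, if_true, idx1_append_singleton]
      cases h1 : idx1 p t
      · cases hps : p s <;> simp [hps, idx1, hx]
      · simp [idx1, hx]
    · simp only [List.cons_append, idx2, hx, Bool.false_eq_true, if_false, ih]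
      cases h2 : idx2 p t
      · cases hps : p s <;> cases h1 : idx1 p t <;> simp [hps, idx1, hx, h1]
      · simp

theorem lastHit?_lt (p : String → Bool) (xs : List String) (j : Nat)
    (h : lastHit? p xs = some j) : j < xs.length := by
  induction xs generalizing j with
  | nil => simp [lastHit?] at h
  | cons x u ih =>
    cases h2 : lastHit? p u with
    | some j' =>
      simp only [lastHit?, h2] at h
      injection h with h; subst h
      have := ih _ h2; simp; omega
    | none =>
      simp only [lastHit?, h2] at h
      split at h
      · injection h with h; subst h; simp
      · exact absurd h (by simp)

theorem sndLast?_lt (p : String → Bool) (xs : List String) (j : Nat)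
    (h : sndLast? p xs = some j) : j < xs.length := by
  induction xs generalizing j with
  | nil => simp [sndLast?] at h
  | cons x u ih =>
    cases h2 : sndLast? p u with
    | some j' =>
      simp only [sndLast?, h2] at h
      injection h with h; subst h
      have := ih _ h2; simp; omega
    | none =>
      simp only [sndLast?, h2] at h
      split at h
      · injection h with h; subst h; simp
      · exact absurd h (by simp)

-- first hit of the reverse = last hit
theorem idx1_reverse (p : String → Bool) (ys : List String) :
    idx1 p ys.reverse = (lastHit? p ys).map (fun j => ys.length - 1 - j) := by
  induction ys with
  | nil => rfl
  | cons s t ih =>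
    rw [List.reverse_cons, idx1_append_singleton, ih]
    cases h : lastHit? p t with
    | some j =>
      have hj := lastHit?_lt p t j h
      simp only [lastHit?, h, Option.map_some, List.length_cons]
      congr 1
      omega
    | none =>
      simp only [lastHit?, h, Option.map_none, List.length_cons, List.length_reverse]
      cases hps : p s <;> simp

-- second hit of the reverse = second-from-last hit
theorem idx2_reverse (p : String → Bool) (ys : List String) :
    idx2 p ys.reverse = (sndLast? p ys).map (fun j => ys.length - 1 - j) := by
  induction ys with
  | nil => rfl
  | cons s t ih =>
    rw [List.reverse_cons, idx2_append_singleton, ih, idx1_reverse]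
    cases h : sndLast? p t with
    | some j =>
      have hj := sndLast?_lt p t j h
      simp only [sndLast?, h, Option.map_some, List.length_cons]
      congr 1
      omega
    | none =>
      simp only [sndLast?, h, Option.map_none, List.length_cons, List.length_reverse]
      cases hps : p s <;> cases h1 : lastHit? p t <;> simp [hps, h1]

-- forward list of hit indices (0-based)
def hitIdxs (p : String → Bool) : List String → List Nat
  | [] => []
  | s :: t => (if p s then [0] else []) ++ (hitIdxs p t).map (· + 1)

theorem zip_take_length {α β : Type} (xs : List α) (ys : List β) :
    xs.zip ys = (xs.take ys.length).zip ys := by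
  induction xs generalizing ys with
  | nil => simp
  | cons x t ih =>
    cases ys with
    | nil => simp
    | cons y u => simp [List.zip_cons_cons, ih u]

-- the loop after the first hit was counted (cnt = 1)
theorem loopA_one (prompt : String) (r : List String) (xs : List String) (a : Int) :
    cutOutProperlyLoop prompt r (xs.zip (PySem.List.pyRange a (a + xs.length) 1)) 1 =
      match idx1 (fun s => PySem.Chars.isIn prompt.toList s.toList) xs with
      | some k => (some ((PySem.List.slice? (PySem.List.slice r none (some (a + k + 1))) none none (-1)).getD []), 2)
      | none => (none, 1) := by
  induction xs generalizing a with
  | nil => simp [PySem.List.pyRange_one_eq_nil, cutOutProperlyLoop, idx1]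
  | cons s t ih =>
    have hb : a + ((s :: t).length : Int) = (a + 1) + (t.length : Int) := by simp; omega
    rw [hb, PySem.List.pyRange_one_cons (by omega), List.zip_cons_cons]
    by_cases hs : PySem.Chars.isIn prompt.toList s.toList = true
    · simp only [cutOutProperlyLoop, PySem.Str.isIn_eq, hs, if_true, idx1]
      norm_num
    · simp only [cutOutProperlyLoop, PySem.Str.isIn_eq, hs, Bool.false_eq_true, if_false, ih, idx1]
      cases h1 : idx1 (fun s => PySem.Chars.isIn prompt.toList s.toList) t with
      | some k =>
        have he : (a + 1) + (k : Int) + 1 = a + ((k + 1 : Nat) : Int) + 1 := by push_cast; ring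
        simp only [Option.map_some, he]
      | none =>
        simp

-- the loop from the start (cnt = 0)
theorem loopA_zero (prompt : String) (r : List String) (xs : List String) (a : Int) :
    cutOutProperlyLoop prompt r (xs.zip (PySem.List.pyRange a (a + xs.length) 1)) 0 =
      match idx2 (fun s => PySem.Chars.isIn prompt.toList s.toList) xs with
      | some k => (some ((PySem.List.slice? (PySem.List.slice r none (some (a + k + 1))) none none (-1)).getD []), 2)
      | none => (none, (xs.countP (fun s => PySem.Chars.isIn prompt.toList s.toList) : Int)) := by
  induction xs generalizing a with
  | nil => simp [PySem.List.pyRange_one_eq_nil, cutOutProperlyLoop, idx2]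
  | cons s t ih =>
    have hb : a + ((s :: t).length : Int) = (a + 1) + (t.length : Int) := by simp; omega
    rw [hb, PySem.List.pyRange_one_cons (by omega), List.zip_cons_cons]
    by_cases hs : PySem.Chars.isIn prompt.toList s.toList = true
    · simp only [cutOutProperlyLoop, PySem.Str.isIn_eq, hs, if_true, idx2]
      norm_num
      rw [loopA_one prompt r t (a + 1)]
      cases h1 : idx1 (fun s => PySem.Chars.isIn prompt.toList s.toList) t with
      | some k =>
        have he : (a + 1) + (k : Int) + 1 = a + ((k + 1 : Nat) : Int) + 1 := by push_cast; ring
        simp only [Option.map_some, he]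
      | none =>
        have hc := idx1_none _ _ h1
        simp [List.countP_cons, hs, hc]
    · simp only [cutOutProperlyLoop, PySem.Str.isIn_eq, hs, Bool.false_eq_true, if_false, ih, idx2]
      cases h2 : idx2 (fun s => PySem.Chars.isIn prompt.toList s.toList) t with
      | some k =>
        have he : (a + 1) + (k : Int) + 1 = a + ((k + 1 : Nat) : Int) + 1 := by push_cast; ring
        simp only [Option.map_some, he]
      | none =>
        simp [List.countP_cons, hs]

-- B's hit list is hitIdxs shifted by the enumerate start
theorem filter_enumerate_eq_hitIdxs (prompt : String) (xs : List String) (a : Int) :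
    ((PySem.List.enumerate xs a).filter (fun q => PySem.Chars.isIn prompt.toList q.2.toList)).map (fun q => q.1)
      = (hitIdxs (fun s => PySem.Chars.isIn prompt.toList s.toList) xs).map (fun j : Nat => a + (j : Int)) := by
  induction xs generalizing a with
  | nil => simp [PySem.List.enumerate_nil, hitIdxs]
  | cons s t ih =>
    by_cases hs : PySem.Chars.isIn prompt.toList s.toList = true
    · simp only [PySem.List.enumerate_cons, List.filter_cons, hs, if_true, List.map_cons,
        ih, hitIdxs, List.singleton_append, List.map_map]
      congr 1
      · simp
      · apply List.map_congr_left
        intro j _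
        simp only [Function.comp_apply]
        push_cast
        ring
    · simp only [PySem.List.enumerate_cons, List.filter_cons, hs, Bool.false_eq_true, if_false,
        ih, hitIdxs, List.map_map, List.nil_append]
      apply List.map_congr_left
      intro j _
      simp only [Function.comp_apply]
      push_cast
      ring

theorem lastHit?_spec (p : String → Bool) (xs : List String) :
    (hitIdxs p xs = [] ∧ lastHit? p xs = none)
    ∨ (∃ u j, hitIdxs p xs = u ++ [j] ∧ lastHit? p xs = some j) := by
  induction xs with
  | nil => left; exact ⟨rfl, rfl⟩
  | cons s t ih =>
    rcases ih with ⟨h1, h2⟩ | ⟨u, j, h1, h2⟩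
    · by_cases hs : p s
      · right
        exact ⟨[], 0, by simp [hitIdxs, hs, h1], by simp [lastHit?, h2, hs]⟩
      · left
        exact ⟨by simp [hitIdxs, hs, h1], by simp [lastHit?, h2, hs]⟩
    · right
      refine ⟨(if p s then [0] else []) ++ u.map (· + 1), j + 1, ?_, ?_⟩
      · simp [hitIdxs, h1]
      · simp [lastHit?, h2]

theorem sndLast?_spec (p : String → Bool) (xs : List String) :
    ((hitIdxs p xs).length ≤ 1 ∧ sndLast? p xs = none)
    ∨ (∃ u j k, hitIdxs p xs = u ++ [j, k] ∧ sndLast? p xs = some j) := by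
  induction xs with
  | nil => left; exact ⟨by simp [hitIdxs], rfl⟩
  | cons s t ih =>
    rcases ih with ⟨h1, h2⟩ | ⟨u, j, k, h1, h2⟩
    · by_cases hs : p s
      · rcases lastHit?_spec p t with ⟨g1, g2⟩ | ⟨v, m, g1, g2⟩
        · left
          constructor
          · simp [hitIdxs, hs, g1]
          · simp [sndLast?, h2, hs, g2]
        · right
          have hv : v = [] := by
            rw [g1] at h1
            simp only [List.length_append, List.length_cons, List.length_nil] at h1
            have : v.length = 0 := by omega
            exact List.eq_nil_of_length_eq_zero this
          refine ⟨[], 0, m + 1, ?_, ?_⟩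
          · simp [hitIdxs, hs, g1, hv]
          · simp [sndLast?, h2, hs, g2]
      · left
        constructor
        · simp [hitIdxs, hs, h1]
        · simp [sndLast?, h2, hs]
    · right
      refine ⟨(if p s then [0] else []) ++ u.map (· + 1), j + 1, k + 1, ?_, ?_⟩
      · simp [hitIdxs, h1]
      · simp [sndLast?, h2]

theorem main_eq (prompt : String) (lst : List String) :
    cutOutProperly prompt lst = cutOutProperly_alt prompt lst := by
  cases lst with
  | nil => rfl
  | cons x t =>
    have hm : (t.reverse.length : Int) = (t.length : Int) := by simp
    -- normalize A
    have hA : cutOutProperly prompt (x :: t) =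
        match cutOutProperlyLoop prompt ((x :: t).reverse)
            ((t.reverse).zip (PySem.List.pyRange 0 (0 + (t.reverse.length : Int)) 1)) 0 with
        | (some res, _) => res
        | (none, _) => (x :: t) := by
      unfold cutOutProperly
      rw [PySem.List.slice?_none_none_neg_one]
      simp only [Option.getD_some]
      have hz : ((x :: t).reverse).zip (PySem.List.pyRange 0 (PySem.List.len ((x :: t).reverse) - 1) 1)
          = (t.reverse).zip (PySem.List.pyRange 0 (0 + (t.reverse.length : Int)) 1) := by
        rw [zip_take_length]
        have hb : PySem.List.len ((x :: t).reverse) - 1 = 0 + (t.reverse.length : Int) := by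
          simp
        rw [hb]
        congr 1
        rw [PySem.List.length_pyRange_one]
        have : ((0 + (t.reverse.length : Int)) - 0).toNat = t.reverse.length := by omega
        rw [this, List.reverse_cons, List.take_append_of_le_length (by simp), List.take_length]
      rw [hz]
      rcases hl : cutOutProperlyLoop prompt ((x :: t).reverse)
          ((t.reverse).zip (PySem.List.pyRange 0 (0 + (t.reverse.length : Int)) 1)) 0 with ⟨o, cnt⟩
      cases o with
      | some res => rfl
      | none => simp
    rw [hA, loopA_zero, idx2_reverse]
    -- normalize B
    unfold cutOutProperly_alt
    rw [PySem.List.slice_from_one]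
    simp only [List.tail_cons]
    simp only [PySem.Str.isIn_eq]
    rw [filter_enumerate_eq_hitIdxs]
    rcases sndLast?_spec (fun s => PySem.Chars.isIn prompt.toList s.toList) t with ⟨h1, h2⟩ | ⟨u, j, k, h1, h2⟩
    · -- fewer than two hits: both sides are lst
      rw [h2]
      simp only [Option.map_none]
      rw [if_neg (by simp only [List.length_map]; omega)]
    · -- at least two hits
      have hj : j < t.length := sndLast?_lt _ t j h2
      rw [h2]
      simp only [Option.map_some]
      rw [h1]
      simp only [List.map_append, List.map_cons, List.map_nil]
      -- A's value
      have hsliceA : (PySem.List.slice ((x :: t).reverse) none (some (0 + ((t.length - 1 - j : Nat) : Int) + 1))) =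
          t.reverse.take (t.length - j) := by
        rw [PySem.List.slice_to (hb := by omega)]
        have hn : ((0 : Int) + ((t.length - 1 - j : Nat) : Int) + 1).toNat = t.length - j := by omega
        rw [hn, List.reverse_cons, List.take_append_of_le_length (by rw [List.length_reverse]; omega)]
      rw [hsliceA, PySem.List.slice?_none_none_neg_one]
      simp only [Option.getD_some]
      have hAval : (t.reverse.take (t.length - j)).reverse = t.drop j := by
        rw [List.take_reverse, List.reverse_reverse]
        congr 1
        omega
      rw [hAval]
      -- B's value
      rw [if_pos (by simp only [List.length_append, List.length_map, List.length_cons, List.length_nil]; omega)]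
      have hget : PySem.List.pyGetD (u.map (fun j : Nat => 1 + (j : Int)) ++ [1 + (j : Int), 1 + (k : Int)]) (-2) 0
          = 1 + (j : Int) := by
        rw [PySem.List.pyGetD_neg_ofNat _ 2 0 (by omega)
          (by simp only [List.length_append, List.length_map, List.length_cons, List.length_nil]; omega)]
        simp
      rw [hget, PySem.List.slice_from (ha := by omega)]
      have hn2 : ((1 : Int) + (j : Int)).toNat = j + 1 := by omega
      rw [hn2]
      rfl

-- ===== VERDICT (by name: the statement is the Claim_ definition above) =====
theorem cutOutProperly_spec : Claim_equal_cutOutProperly := by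
  intro prompt lst _
  unfold Spec_cutOutProperly
  exact main_eq prompt lst
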